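-- pv_equiv track=rewrite | github.com/Aizak5/AOIS | lab5/lab5.py | combine_terms
-- ===== SOURCE A (Python) =====
-- def combine_terms(a, b):
--     diff = 0
--     out = []
--     for ca, cb in zip(a, b):
--         if ca == cb:
--             out.append(ca)
--         else:
--             diff += 1
--             out.append('-')
--             if diff > 1:
--                 return None
--     return ''.join(out)
-- ===== SOURCE B (Python) =====
-- def combine_terms(a, b):
--     # Truncate to the common length (zip semantics), then locate the single
--     # mismatch: if the truncations are equal there is none; otherwise find the
--     # first differing position and accept iff the remaining suffixes are equal.
--     n = min(len(a), len(b))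
--     ta, tb = a[:n], b[:n]
--     if ta == tb:
--         return ta
--     i = 0
--     while ta[i] == tb[i]:
--         i += 1
--     if ta[i + 1:] != tb[i + 1:]:
--         return None
--     return ta[:i] + '-' + ta[i + 1:]
-- ===== Notes on version B (the rewrite author's own statement) =====
-- stated objective: alternative
-- what changed: B drops A's per-character diff-counting merge loop: it truncates both strings to the common length, returns the truncation if the sides are equal, otherwise locates the first mismatching index and accepts iff the remaining suffix slices are equal wholesale, building the result from slices with a single '-'.
import Mathlib
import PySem

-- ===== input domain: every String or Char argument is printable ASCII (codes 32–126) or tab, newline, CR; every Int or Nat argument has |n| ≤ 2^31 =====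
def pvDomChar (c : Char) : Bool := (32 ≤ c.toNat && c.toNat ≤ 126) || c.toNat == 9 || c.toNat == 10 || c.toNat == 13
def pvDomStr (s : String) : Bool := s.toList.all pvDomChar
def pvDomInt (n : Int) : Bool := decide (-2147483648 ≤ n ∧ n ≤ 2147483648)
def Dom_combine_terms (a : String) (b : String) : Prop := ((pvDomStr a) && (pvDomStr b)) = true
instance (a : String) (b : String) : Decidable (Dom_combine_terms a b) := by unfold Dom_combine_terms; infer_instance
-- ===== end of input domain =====

-- B replaces A's per-character counting loop by first-mismatch location plus wholesale suffix slice comparison; objective: alternative decomposition (same O(n)).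


-- ===== PORT A =====
-- A's loop over zip(a,b) with state (diff, out) and an early 'return None' when diff > 1.
def combineTermsGo : List (Char × Char) → Nat → List Char → Option String
  | [], _, out => some (String.mk out.reverse)
  | (ca, cb) :: rest, diff, out =>
    if ca == cb then
      combineTermsGo rest diff (ca :: out)
    else if diff + 1 > 1 then
      none
    else
      combineTermsGo rest (diff + 1) ('-' :: out)

def combine_terms (a : String) (b : String) : Option String :=
  combineTermsGo (a.toList.zip b.toList) 0 []

-- ===== PORT B =====
-- B's while loop 'i += 1 while ta[i] == tb[i]': the index of the first mismatch.
def firstMismatch : List Char → List Char → Nat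
  | x :: xs, y :: ys => if x == y then firstMismatch xs ys + 1 else 0
  | _, _ => 0

-- B's body on the truncated character lists (ta, tb of equal length).
def combineAlt (la lb : List Char) : Option (List Char) :=
  if la == lb then some la
  else
    let i := firstMismatch la lb
    if la.drop (i + 1) == lb.drop (i + 1) then
      some (la.take i ++ '-' :: la.drop (i + 1))
    else none

def combine_terms_alt (a : String) (b : String) : Option String :=
  let n := min a.toList.length b.toList.length
  (combineAlt (a.toList.take n) (b.toList.take n)).map String.mk

-- ===== PRECONDITION & SPEC =====
def Spec_combine_terms (a : String) (b : String) (out : Option String) : Prop := out = combine_terms_alt a b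
instance (a : String) (b : String) (out : Option String) : Decidable (Spec_combine_terms a b out) := by unfold Spec_combine_terms; infer_instance

-- ===== CLAIM (what is proved, stated in full; the proofs are below) =====
def Claim_equal_combine_terms : Prop := ∀ (a : String) (b : String), Dom_combine_terms a b → Spec_combine_terms a b (combine_terms a b)

-- ===== LEMMAS AND PROOFS =====
-- Characterisation of A's loop: it returns none iff more than one position differs,
-- and otherwise the merged string ('-' at the mismatches).
lemma combineTermsGo_eq (l : List (Char × Char)) :
    ∀ (diff : Nat) (acc : List Char), diff ≤ 1 →
    combineTermsGo l diff acc =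
      (if diff + l.countP (fun p => p.1 != p.2) > 1 then none
       else some (String.mk (acc.reverse ++ l.map (fun p => if p.1 == p.2 then p.1 else '-')))) := by
  induction l with
  | nil =>
    intro diff acc h
    simp [combineTermsGo]
    omega
  | cons hd tl ih =>
    intro diff acc h
    obtain ⟨ca, cb⟩ := hd
    by_cases hc : ca = cb
    · simp [combineTermsGo, hc, ih diff (cb :: acc) h]
    · have hne : (ca == cb) = false := by simp [hc]
      have hcnt : List.countP (fun p => p.1 != p.2) ((ca, cb) :: tl)
          = List.countP (fun p => p.1 != p.2) tl + 1 := by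
        simp [hc]
      rcases Nat.lt_or_ge diff 1 with h0 | h1
      · have hd0 : diff = 0 := by omega
        rw [hd0]
        simp only [combineTermsGo, hne, Bool.false_eq_true, if_false]
        norm_num
        rw [ih 1 ('-' :: acc) (le_refl 1), hcnt]
        simp only [List.reverse_cons, List.append_assoc, List.cons_append, List.nil_append]
        rw [Nat.add_comm 1 (List.countP (fun p => p.1 != p.2) tl)]
        simp [hc]
      · have hd1 : diff = 1 := by omega
        rw [hd1]
        simp only [combineTermsGo, hne, Bool.false_eq_true, if_false]
        rw [hcnt]
        norm_num

-- For equal-length lists: no mismatch in the zip iff the lists are equal.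
lemma countP_zip_zero_iff : ∀ (xs ys : List Char), xs.length = ys.length →
    ((xs.zip ys).countP (fun p => p.1 != p.2) = 0 ↔ xs = ys) := by
  intro xs
  induction xs with
  | nil => intro ys h; cases ys <;> simp at h ⊢
  | cons x xs ih =>
    intro ys h
    cases ys with
    | nil => simp at h
    | cons y ys =>
      simp only [List.length_cons, Nat.add_right_cancel_iff] at h
      by_cases hxy : x = y
      · simp [hxy, List.zip_cons_cons, ih ys h]
      · simp [List.zip_cons_cons, hxy]

lemma map_merge_zip_self' : ∀ (xs : List Char),
    (xs.zip xs).map (fun p => if p.1 = p.2 then p.1 else '-') = xs := by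
  intro xs; induction xs with
  | nil => simp
  | cons x xs ih =>
    rw [List.zip_cons_cons, List.map_cons, ih]
    simp

lemma mem_zip_self_eq : ∀ (xs : List Char) (c d : Char), (c, d) ∈ xs.zip xs → c = d := by
  intro xs
  induction xs with
  | nil => intro c d hm; simp at hm
  | cons z zs ih =>
    intro c d hm
    rw [List.zip_cons_cons, List.mem_cons] at hm
    rcases hm with hm | hm
    · cases hm; rfl
    · exact ih c d hm

-- Characterisation of B's body against the same closed form.
lemma combineAlt_eq : ∀ (la lb : List Char), la.length = lb.length →
    combineAlt la lb =
      (if (la.zip lb).countP (fun p => p.1 != p.2) > 1 then none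
       else some ((la.zip lb).map (fun p => if p.1 == p.2 then p.1 else '-'))) := by
  intro la
  induction la with
  | nil => intro lb h; cases lb <;> simp_all [combineAlt]
  | cons x xs ih =>
    intro lb h
    cases lb with
    | nil => simp at h
    | cons y ys =>
      simp only [List.length_cons, Nat.add_right_cancel_iff] at h
      by_cases hxy : x = y
      · subst hxy
        by_cases hxs : xs = ys
        · subst hxs
          have h0 := (countP_zip_zero_iff xs xs rfl).mpr rfl
          simp [combineAlt, List.zip_cons_cons, h0, map_merge_zip_self']
        · have hne : (x :: xs) ≠ (x :: ys) := by simp [hxs]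
          have key : combineAlt (x :: xs) (x :: ys) = Option.map (x :: ·) (combineAlt xs ys) := by
            simp only [combineAlt, beq_iff_eq, if_neg hne, if_neg hxs, firstMismatch,
              beq_self_eq_true, if_true, List.drop_succ_cons, List.take_succ_cons]
            by_cases hdrop : xs.drop (firstMismatch xs ys + 1) = ys.drop (firstMismatch xs ys + 1)
            · simp [hdrop]
            · simp [hdrop]
          rw [key, ih ys h]
          simp only [List.zip_cons_cons, List.countP_cons, List.map_cons]
          split <;> simp_all
      · have hne : (x :: xs) ≠ (y :: ys) := by simp [hxy]
        have hb : (x == y) = false := by simp [hxy]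
        simp only [combineAlt, beq_iff_eq, if_neg hne, firstMismatch, hb,
          Bool.false_eq_true, if_false, List.drop_succ_cons, List.drop_zero,
          List.take_zero, List.nil_append, List.zip_cons_cons, List.countP_cons,
          List.map_cons, hxy, bne_iff_ne, ne_eq, not_false_eq_true]
        by_cases hxs : xs = ys
        · subst hxs
          have h0 := (countP_zip_zero_iff xs xs rfl).mpr rfl
          simp [map_merge_zip_self']
          exact mem_zip_self_eq xs
        · have h0 : (xs.zip ys).countP (fun p => p.1 != p.2) ≠ 0 := fun hc =>
            hxs ((countP_zip_zero_iff xs ys h).mp hc)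
          have : (xs.zip ys).countP (fun p => p.1 != p.2) + 1 > 1 := by omega
          simp [hxs, this]

-- Truncating both lists to the common length does not change the zip.
lemma zip_take_min : ∀ (xs ys : List Char),
    (xs.take (min xs.length ys.length)).zip (ys.take (min xs.length ys.length)) = xs.zip ys := by
  intro xs
  induction xs with
  | nil => intro ys; simp
  | cons x xs ih =>
    intro ys
    cases ys with
    | nil => simp
    | cons y ys =>
      simp [Nat.succ_min_succ, List.zip_cons_cons, ih ys]

lemma length_take_min_eq (xs ys : List Char) :
    (xs.take (min xs.length ys.length)).length = (ys.take (min xs.length ys.length)).length := by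
  simp [List.length_take]

-- ===== VERDICT (by name: the statement is the Claim_ definition above) =====
theorem combine_terms_spec : Claim_equal_combine_terms := by
  intro a b _
  unfold Spec_combine_terms combine_terms combine_terms_alt
  simp only []
  rw [combineTermsGo_eq _ 0 [] (by omega),
      combineAlt_eq _ _ (length_take_min_eq a.toList b.toList), zip_take_min]
  split <;> simp <;> omega
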